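-- pv_equiv track=rewrite | github.com/nikpopesku/competitive_programming | cses.fi/2422.py | find_middle_element
-- ===== SOURCE A (Python) =====
-- def count_less_equal(x, n):
--     count = 0
--     for i in range(1, n + 1):
--         # Count elements in the i-th row that are <= x
--         count += min(x // i, n)
--     return count
--
-- def find_middle_element(n):
--     left, right = 1, n * n
--     middle_position = (n * n - 1) // 2
--
--     while left < right:
--         mid = (left + right) // 2
--         if count_less_equal(mid, n) <= middle_position:
--             left = mid + 1
--         else:
--             right = mid
--
--     return left
-- ===== SOURCE B (Python) =====
-- def count_at_most(x, n):
--     # amortized two-pointer staircase walk: j tracks the largest column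
--     # with i*j <= x; it only ever moves down as i grows (no division)
--     total = 0
--     j = n
--     for i in range(1, n + 1):
--         while j > 0 and i * j > x:
--             j -= 1
--         total += j
--     return total
--
-- def find_middle_element(n):
--     lo, hi = 1, n * n
--     target = (n * n - 1) // 2 + 1
--     while lo < hi:
--         mid = (lo + hi) // 2
--         if count_at_most(mid, n) >= target:
--             hi = mid
--         else:
--             lo = mid + 1
--     return lo
-- ===== Notes on version B (the rewrite author's own statement) =====
-- stated objective: alternative
-- what changed: Keeps the bisection on the answer value but replaces A's division-based per-row counting (summing min(x//i, n) over the rows) with a division-free amortized two-pointer staircase walk over the table, and flips the search to the first value whose count reaches the middle target (one more than A's middle position); B matches A on every int, including non-positive n.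
import Mathlib
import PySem

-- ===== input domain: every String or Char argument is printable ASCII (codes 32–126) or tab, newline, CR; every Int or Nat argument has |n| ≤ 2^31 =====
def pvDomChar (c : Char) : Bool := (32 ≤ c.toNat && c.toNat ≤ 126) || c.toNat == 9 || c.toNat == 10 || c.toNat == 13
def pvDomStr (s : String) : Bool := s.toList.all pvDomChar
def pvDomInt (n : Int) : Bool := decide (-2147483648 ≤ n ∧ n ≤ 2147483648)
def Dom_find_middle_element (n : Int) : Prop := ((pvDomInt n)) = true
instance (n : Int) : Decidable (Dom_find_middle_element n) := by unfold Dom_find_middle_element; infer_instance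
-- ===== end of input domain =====

-- B keeps the bisection on the answer but counts with a division-free two-pointer
-- staircase walk and the dual branch condition (first count ≥ target); equivalence is total.

-- ===== PORT A =====
-- port of count_less_equal(x, n)
def count_less_equal (x n : Int) : Int :=
  (PySem.List.pyRange 1 (n + 1) 1).foldl
    (fun count i => count + min (PySem.Int.floordiv x i) n) 0

-- the 'while left < right' loop of A, recursion on right - left
def pvLoopA (n pos left right : Int) : Int :=
  if h : left < right then
    let mid := PySem.Int.floordiv (left + right) 2
    if count_less_equal mid n ≤ pos then pvLoopA n pos (mid + 1) right
    else pvLoopA n pos left mid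
  else left
termination_by (right - left).toNat
decreasing_by
  · have h0 : left ≤ PySem.Int.floordiv (left + right) 2 := by
      rw [PySem.Int.le_floordiv_iff_mul_le (by omega)]; omega
    have h1 : PySem.Int.floordiv (left + right) 2 < right := by
      rw [PySem.Int.floordiv_lt_iff_lt_mul (by omega)]; omega
    omega
  · have h2 : PySem.Int.floordiv (left + right) 2 < right := by
      rw [PySem.Int.floordiv_lt_iff_lt_mul (by omega)]; omega
    omega

def find_middle_element (n : Int) : Int :=
  pvLoopA n (PySem.Int.floordiv (n * n - 1) 2) 1 (n * n)

-- ===== PORT B =====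
-- the inner 'while j > 0 and i * j > x: j -= 1' of count_at_most
def pvStep (x i j : Int) : Int :=
  if h : 0 < j ∧ x < i * j then pvStep x i (j - 1) else j
termination_by j.toNat
decreasing_by omega

-- port of count_at_most(x, n); the loop carries (total, j)
def count_at_most (x n : Int) : Int :=
  ((PySem.List.pyRange 1 (n + 1) 1).foldl
    (fun s i => let j := pvStep x i s.2; (s.1 + j, j)) ((0 : Int), n)).1

-- the 'while lo < hi' loop of B, recursion on hi - lo
def pvLoopB (n target lo hi : Int) : Int :=
  if h : lo < hi then
    let mid := PySem.Int.floordiv (lo + hi) 2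
    if count_at_most mid n ≥ target then pvLoopB n target lo mid
    else pvLoopB n target (mid + 1) hi
  else lo
termination_by (hi - lo).toNat
decreasing_by
  · have h2 : PySem.Int.floordiv (lo + hi) 2 < hi := by
      rw [PySem.Int.floordiv_lt_iff_lt_mul (by omega)]; omega
    omega
  · have h0 : lo ≤ PySem.Int.floordiv (lo + hi) 2 := by
      rw [PySem.Int.le_floordiv_iff_mul_le (by omega)]; omega
    have h1 : PySem.Int.floordiv (lo + hi) 2 < hi := by
      rw [PySem.Int.floordiv_lt_iff_lt_mul (by omega)]; omega
    omega

def find_middle_element_alt (n : Int) : Int :=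
  pvLoopB n (PySem.Int.floordiv (n * n - 1) 2 + 1) 1 (n * n)

-- ===== PRECONDITION & SPEC =====
def Spec_find_middle_element (n : Int) (out : Int) : Prop := out = find_middle_element_alt n
instance (n : Int) (out : Int) : Decidable (Spec_find_middle_element n out) := by unfold Spec_find_middle_element; infer_instance

-- ===== CLAIM (what is proved, stated in full; the proofs are below) =====
def Claim_equal_find_middle_element : Prop := ∀ (n : Int), Dom_find_middle_element n → Spec_find_middle_element n (find_middle_element n)

-- ===== LEMMAS AND PROOFS =====

-- the staircase pointer lands exactly on min j (x // i)
lemma pvStep_eq (x i : Int) (hx : 0 ≤ x) (hi : 1 ≤ i) :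
    ∀ fuel : Nat, ∀ j : Int, j.toNat ≤ fuel → 0 ≤ j →
    pvStep x i j = min j (PySem.Int.floordiv x i) := by
  have hd0 : 0 ≤ PySem.Int.floordiv x i := by
    rw [PySem.Int.le_floordiv_iff_mul_le (by omega)]; omega
  intro fuel
  induction fuel with
  | zero =>
    intro j hfuel hj0
    have : j = 0 := by omega
    subst this
    rw [pvStep]
    simp only [lt_irrefl, false_and, dite_false]
    omega
  | succ fuel ih =>
    intro j hfuel hj0
    rw [pvStep]
    by_cases hc : 0 < j ∧ x < i * j
    · have hdj : PySem.Int.floordiv x i < j := by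
        rw [PySem.Int.floordiv_lt_iff_lt_mul (by omega)]
        calc x < i * j := hc.2
          _ = j * i := by ring
      rw [dif_pos hc, ih (j - 1) (by omega) (by omega)]
      omega
    · rw [dif_neg hc]
      rcases (by omega : j = 0 ∨ (0 < j ∧ i * j ≤ x)) with h | h
      · omega
      · have hdj : j ≤ PySem.Int.floordiv x i := by
          rw [PySem.Int.le_floordiv_iff_mul_le (by omega)]
        -- j * i = i * j ≤ x
          calc j * i = i * j := by ring
            _ ≤ x := h.2
        omega

-- x // i is antitone in the divisor on 0 ≤ x
lemma fdiv_antitone (x i i' : Int) (hx : 0 ≤ x) (hi : 1 ≤ i) (hii' : i ≤ i') :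
    PySem.Int.floordiv x i' ≤ PySem.Int.floordiv x i := by
  have hq0 : 0 ≤ PySem.Int.floordiv x i' := by
    rw [PySem.Int.le_floordiv_iff_mul_le (by omega)]; omega
  have hqx : PySem.Int.floordiv x i' * i' ≤ x := by
    have h1 := PySem.Int.floordiv_mul_add_mod x i'
    have h2 := PySem.Int.mod_nonneg x (b := i') (by omega)
    omega
  rw [PySem.Int.le_floordiv_iff_mul_le (by omega)]
  calc PySem.Int.floordiv x i' * i ≤ PySem.Int.floordiv x i' * i' := by
        exact mul_le_mul_of_nonneg_left hii' hq0
    _ ≤ x := hqx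

-- loop invariant for the two-pointer count: the carried pointer dominates every
-- remaining row's true column count, so each row contributes min(x // i, n)
lemma countB_fold (x n : Int) (hx : 0 ≤ x) :
    ∀ fuel : Nat, ∀ a cnt j : Int, (n + 1 - a).toNat ≤ fuel → 1 ≤ a → 0 ≤ j → j ≤ n →
    (∀ i : Int, a ≤ i → min n (PySem.Int.floordiv x i) ≤ j) →
    ((PySem.List.pyRange a (n + 1) 1).foldl
        (fun s i => let j' := pvStep x i s.2; (s.1 + j', j')) (cnt, j)).1
      = (PySem.List.pyRange a (n + 1) 1).foldl
          (fun c i => c + min (PySem.Int.floordiv x i) n) cnt := by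
  intro fuel
  induction fuel with
  | zero =>
    intro a cnt j hfuel ha hj0 hjn hdom
    rw [PySem.List.pyRange_one_eq_nil (by omega)]
    simp
  | succ fuel ih =>
    intro a cnt j hfuel ha hj0 hjn hdom
    by_cases hlt : a < n + 1
    · rw [PySem.List.pyRange_one_cons hlt]
      simp only [List.foldl_cons]
      have hstep : pvStep x a j = min j (PySem.Int.floordiv x a) :=
        pvStep_eq x a hx (by omega) j.toNat j (le_refl _) hj0
      have hda : min n (PySem.Int.floordiv x a) ≤ j := hdom a (by omega)
      have hj' : pvStep x a j = min (PySem.Int.floordiv x a) n := by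
        rw [hstep]; omega
      have hd0 : 0 ≤ PySem.Int.floordiv x a := by
        rw [PySem.Int.le_floordiv_iff_mul_le (by omega)]; omega
      rw [hj']
      refine ih (a + 1) (cnt + min (PySem.Int.floordiv x a) n)
        (min (PySem.Int.floordiv x a) n) (by omega) (by omega) (by omega) (by omega) ?_
      intro i hi
      have := fdiv_antitone x a i hx (by omega) (by omega)
      omega
    · rw [PySem.List.pyRange_one_eq_nil (by omega)]
      simp

-- on the values the search probes (x ≥ 0) the two counts agree
lemma count_eq (x n : Int) (hx : 0 ≤ x) : count_at_most x n = count_less_equal x n := by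
  unfold count_at_most count_less_equal
  by_cases hn : 1 ≤ n
  · exact countB_fold x n hx (n + 1 - 1).toNat 1 0 n (by omega) (by omega) (by omega)
      (by omega) (fun i _ => by omega)
  · rw [PySem.List.pyRange_one_eq_nil (by omega)]
    simp

-- the two bisection loops walk in lockstep: dual conditions, same interval updates
lemma loops_eq (n pos : Int) :
    ∀ fuel : Nat, ∀ lo hi : Int, (hi - lo).toNat ≤ fuel → 1 ≤ lo →
    pvLoopB n (pos + 1) lo hi = pvLoopA n pos lo hi := by
  intro fuel
  induction fuel with
  | zero =>
    intro lo hi hfuel hlo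
    have hnlt : ¬ lo < hi := by omega
    rw [pvLoopA, pvLoopB]
    simp [hnlt]
  | succ fuel ih =>
    intro lo hi hfuel hlo
    rw [pvLoopA, pvLoopB]
    by_cases hlt : lo < hi
    · simp only [hlt, dite_true]
      set mid := PySem.Int.floordiv (lo + hi) 2 with hmid
      have hmid1 : lo ≤ mid := by
        rw [hmid, PySem.Int.le_floordiv_iff_mul_le (by omega)]; omega
      have hmid2 : mid < hi := by
        rw [hmid, PySem.Int.floordiv_lt_iff_lt_mul (by omega)]; omega
      have hcnt : count_at_most mid n = count_less_equal mid n :=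
        count_eq mid n (by omega)
      by_cases hc : count_less_equal mid n ≤ pos
      · rw [if_neg (by omega), if_pos hc]
        exact ih (mid + 1) hi (by omega) (by omega)
      · rw [if_pos (by omega), if_neg hc]
        exact ih lo mid (by omega) (by omega)
    · simp [hlt]

-- ===== VERDICT (by name: the statement is the Claim_ definition above) =====
theorem find_middle_element_spec : Claim_equal_find_middle_element := by
  intro n _
  unfold Spec_find_middle_element find_middle_element find_middle_element_alt
  exact (loops_eq n (PySem.Int.floordiv (n * n - 1) 2)
    (n * n - 1).toNat 1 (n * n) (by omega) (by omega)).symm
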